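-- pv_equiv track=rewrite | github.com/ayushamahajan24/verifyx-backend | main.py | compute_verdict_from_factchecks
-- ===== SOURCE A (Python) =====
-- def compute_verdict_from_factchecks(factchecks: list):
--     if not factchecks:
--         return "UNVERIFIED"
--     verdicts = []
--     for fc in factchecks:
--         for r in fc.get("claimReview", []):
--             rating = (r.get("textualRating") or "").upper()
--             if "FALSE" in rating:
--                 verdicts.append("FALSE")
--             elif "TRUE" in rating:
--                 verdicts.append("TRUE")
--             elif "MISLEADING" in rating:
--                 verdicts.append("MISLEADING")
--             elif "PARTLY" in rating:
--                 verdicts.append("PARTLY TRUE")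
--     if "FALSE" in verdicts:
--         return "FALSE"
--     if "TRUE" in verdicts:
--         return "TRUE"
--     if "MISLEADING" in verdicts:
--         return "MISLEADING"
--     if "PARTLY TRUE" in verdicts:
--         return "PARTLY TRUE"
--     return "UNVERIFIED"
-- ===== SOURCE B (Python) =====
-- def compute_verdict_from_factchecks(factchecks: list):
--     # Keyword-major staged passes: flatten all ratings once, then for each verdict
--     # in priority order scan for its keyword and return on first hit. Correct because
--     # at stage k no rating contains any higher-priority keyword, so containing the
--     # stage's keyword means the review resolves to exactly that verdict.
--     ratings = [(r.get("textualRating") or "").upper()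
--                for fc in factchecks
--                for r in fc.get("claimReview", [])]
--     if any("FALSE" in s for s in ratings):
--         return "FALSE"
--     if any("TRUE" in s for s in ratings):
--         return "TRUE"
--     if any("MISLEADING" in s for s in ratings):
--         return "MISLEADING"
--     if any("PARTLY" in s for s in ratings):
--         return "PARTLY TRUE"
--     return "UNVERIFIED"
-- ===== Notes on version B (the rewrite author's own statement) =====
-- stated objective: simpler
-- what changed: B transposes the traversal: instead of a record-major pass that classifies each review with an if/elif chain into a verdict list and then does a four-way membership scan, B flattens the ratings once and makes one keyword-major 'any' pass per verdict in priority order, returning on the first keyword found anywhere.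
import Mathlib
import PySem

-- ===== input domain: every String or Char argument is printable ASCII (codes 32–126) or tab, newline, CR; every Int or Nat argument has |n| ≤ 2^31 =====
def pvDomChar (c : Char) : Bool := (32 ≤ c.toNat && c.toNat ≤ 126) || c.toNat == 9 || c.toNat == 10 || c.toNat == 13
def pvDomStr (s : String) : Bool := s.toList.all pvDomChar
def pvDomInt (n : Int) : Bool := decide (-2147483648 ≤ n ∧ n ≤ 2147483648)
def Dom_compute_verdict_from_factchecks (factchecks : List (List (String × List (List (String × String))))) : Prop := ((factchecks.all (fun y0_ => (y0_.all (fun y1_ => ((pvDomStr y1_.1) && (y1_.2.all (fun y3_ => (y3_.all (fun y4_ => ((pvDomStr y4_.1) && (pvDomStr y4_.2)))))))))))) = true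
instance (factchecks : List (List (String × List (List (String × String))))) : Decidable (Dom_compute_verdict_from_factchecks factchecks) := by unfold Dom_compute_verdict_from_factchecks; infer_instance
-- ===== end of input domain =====

-- B replaces A's record-major classify-then-scan (verdict list + four membership checks)
-- by keyword-major staged passes over the flattened ratings (objective: simpler).

-- ===== PORT A =====
def compute_verdict_from_factchecks (factchecks : List (List (String × List (List (String × String))))) : String :=
  if factchecks = [] then "UNVERIFIED"
  else
    let verdicts := factchecks.foldl (fun vs fc =>
      ((PySem.Dict.mk fc).getD "claimReview" []).foldl (fun vs r =>
        -- rating = (r.get("textualRating") or "").upper()  ('or ""' = default "" on missing;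
        -- a present empty string also yields "", so .getD "" is exact)
        let rating := PySem.Str.upper (((PySem.Dict.mk r).get? "textualRating").getD "")
        if PySem.Str.isIn "FALSE" rating then vs ++ ["FALSE"]
        else if PySem.Str.isIn "TRUE" rating then vs ++ ["TRUE"]
        else if PySem.Str.isIn "MISLEADING" rating then vs ++ ["MISLEADING"]
        else if PySem.Str.isIn "PARTLY" rating then vs ++ ["PARTLY TRUE"]
        else vs) vs) ([] : List String)
    if "FALSE" ∈ verdicts then "FALSE"
    else if "TRUE" ∈ verdicts then "TRUE"
    else if "MISLEADING" ∈ verdicts then "MISLEADING"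
    else if "PARTLY TRUE" ∈ verdicts then "PARTLY TRUE"
    else "UNVERIFIED"

-- ===== PORT B =====
-- the flattened ratings list comprehension
def cvRatings (factchecks : List (List (String × List (List (String × String))))) : List String :=
  factchecks.flatMap (fun fc =>
    ((PySem.Dict.mk fc).getD "claimReview" []).map (fun r =>
      PySem.Str.upper (((PySem.Dict.mk r).get? "textualRating").getD "")))

def compute_verdict_from_factchecks_alt (factchecks : List (List (String × List (List (String × String))))) : String :=
  let ratings := cvRatings factchecks
  if ratings.any (fun s => PySem.Str.isIn "FALSE" s) then "FALSE"
  else if ratings.any (fun s => PySem.Str.isIn "TRUE" s) then "TRUE"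
  else if ratings.any (fun s => PySem.Str.isIn "MISLEADING" s) then "MISLEADING"
  else if ratings.any (fun s => PySem.Str.isIn "PARTLY" s) then "PARTLY TRUE"
  else "UNVERIFIED"

-- ===== PRECONDITION & SPEC =====
def Spec_compute_verdict_from_factchecks (factchecks : List (List (String × List (List (String × String))))) (out : String) : Prop := out = compute_verdict_from_factchecks_alt factchecks
instance (factchecks : List (List (String × List (List (String × String))))) (out : String) : Decidable (Spec_compute_verdict_from_factchecks factchecks out) := by unfold Spec_compute_verdict_from_factchecks; infer_instance

-- ===== CLAIM (what is proved, stated in full; the proofs are below) =====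
def Claim_equal_compute_verdict_from_factchecks : Prop := ∀ (factchecks : List (List (String × List (List (String × String))))), Dom_compute_verdict_from_factchecks factchecks → Spec_compute_verdict_from_factchecks factchecks (compute_verdict_from_factchecks factchecks)

-- ===== LEMMAS AND PROOFS =====

-- A's per-review label as a function of the upper-cased rating string
def cvLabOf (s : String) : Option String :=
  if PySem.Str.isIn "FALSE" s then some "FALSE"
  else if PySem.Str.isIn "TRUE" s then some "TRUE"
  else if PySem.Str.isIn "MISLEADING" s then some "MISLEADING"
  else if PySem.Str.isIn "PARTLY" s then some "PARTLY TRUE"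
  else none

-- A's inner loop appends exactly (cvLabOf rating).toList per review
theorem cvA_inner (rs : List (List (String × String))) (vs : List String) :
    rs.foldl (fun vs r =>
        let rating := PySem.Str.upper (((PySem.Dict.mk r).get? "textualRating").getD "")
        if PySem.Str.isIn "FALSE" rating then vs ++ ["FALSE"]
        else if PySem.Str.isIn "TRUE" rating then vs ++ ["TRUE"]
        else if PySem.Str.isIn "MISLEADING" rating then vs ++ ["MISLEADING"]
        else if PySem.Str.isIn "PARTLY" rating then vs ++ ["PARTLY TRUE"]
        else vs) vs
      = vs ++ (rs.map (fun r => PySem.Str.upper (((PySem.Dict.mk r).get? "textualRating").getD ""))).filterMap cvLabOf := by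
  induction rs generalizing vs with
  | nil => simp
  | cons r rs ih =>
      simp only [List.foldl_cons, List.map_cons, List.filterMap_cons, ih]
      set s := PySem.Str.upper (((PySem.Dict.mk r).get? "textualRating").getD "") with hs
      have : (if PySem.Str.isIn "FALSE" s then vs ++ ["FALSE"]
        else if PySem.Str.isIn "TRUE" s then vs ++ ["TRUE"]
        else if PySem.Str.isIn "MISLEADING" s then vs ++ ["MISLEADING"]
        else if PySem.Str.isIn "PARTLY" s then vs ++ ["PARTLY TRUE"]
        else vs) = vs ++ (cvLabOf s).toList := by
        simp only [cvLabOf]; split_ifs <;> simp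
      rw [this]
      cases h : cvLabOf s <;> simp [List.append_assoc]

-- A's whole double loop: verdicts = (cvRatings factchecks).filterMap cvLabOf
theorem cvA_outer (factchecks : List (List (String × List (List (String × String))))) (vs : List String) :
    factchecks.foldl (fun vs fc =>
      ((PySem.Dict.mk fc).getD "claimReview" []).foldl (fun vs r =>
        let rating := PySem.Str.upper (((PySem.Dict.mk r).get? "textualRating").getD "")
        if PySem.Str.isIn "FALSE" rating then vs ++ ["FALSE"]
        else if PySem.Str.isIn "TRUE" rating then vs ++ ["TRUE"]
        else if PySem.Str.isIn "MISLEADING" rating then vs ++ ["MISLEADING"]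
        else if PySem.Str.isIn "PARTLY" rating then vs ++ ["PARTLY TRUE"]
        else vs) vs) vs
      = vs ++ (cvRatings factchecks).filterMap cvLabOf := by
  induction factchecks generalizing vs with
  | nil => simp [cvRatings]
  | cons fc fcs ih =>
      rw [List.foldl_cons, cvA_inner, ih]
      simp [cvRatings, List.filterMap_append, List.append_assoc]

-- membership facts for the four labels in the filterMapped list
theorem cvLabOf_false_iff (s : String) :
    cvLabOf s = some "FALSE" ↔ PySem.Str.isIn "FALSE" s = true := by
  unfold cvLabOf; split_ifs <;> simp_all

theorem cvLabOf_true_iff (s : String) :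
    cvLabOf s = some "TRUE" ↔ (PySem.Str.isIn "TRUE" s = true ∧ ¬ PySem.Str.isIn "FALSE" s = true) := by
  unfold cvLabOf; split_ifs <;> simp_all

theorem cvLabOf_mis_iff (s : String) :
    cvLabOf s = some "MISLEADING" ↔ (PySem.Str.isIn "MISLEADING" s = true ∧ ¬ PySem.Str.isIn "FALSE" s = true ∧ ¬ PySem.Str.isIn "TRUE" s = true) := by
  unfold cvLabOf; split_ifs <;> simp_all

theorem cvLabOf_partly_iff (s : String) :
    cvLabOf s = some "PARTLY TRUE" ↔ (PySem.Str.isIn "PARTLY" s = true ∧ ¬ PySem.Str.isIn "FALSE" s = true ∧ ¬ PySem.Str.isIn "TRUE" s = true ∧ ¬ PySem.Str.isIn "MISLEADING" s = true) := by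
  unfold cvLabOf; split_ifs <;> simp_all

theorem cv_mem_false (L : List String) :
    "FALSE" ∈ L.filterMap cvLabOf ↔ L.any (fun s => PySem.Str.isIn "FALSE" s) = true := by
  simp only [List.mem_filterMap, List.any_eq_true, cvLabOf_false_iff]

theorem cv_mem_true (L : List String) (hF : ¬ L.any (fun s => PySem.Str.isIn "FALSE" s) = true) :
    "TRUE" ∈ L.filterMap cvLabOf ↔ L.any (fun s => PySem.Str.isIn "TRUE" s) = true := by
  simp only [List.any_eq_true, not_exists, not_and] at hF
  simp only [List.mem_filterMap, List.any_eq_true, cvLabOf_true_iff]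
  exact ⟨fun ⟨s, hs, h, _⟩ => ⟨s, hs, h⟩, fun ⟨s, hs, h⟩ => ⟨s, hs, h, hF s hs⟩⟩

theorem cv_mem_mis (L : List String) (hF : ¬ L.any (fun s => PySem.Str.isIn "FALSE" s) = true)
    (hT : ¬ L.any (fun s => PySem.Str.isIn "TRUE" s) = true) :
    "MISLEADING" ∈ L.filterMap cvLabOf ↔ L.any (fun s => PySem.Str.isIn "MISLEADING" s) = true := by
  simp only [List.any_eq_true, not_exists, not_and] at hF hT
  simp only [List.mem_filterMap, List.any_eq_true, cvLabOf_mis_iff]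
  exact ⟨fun ⟨s, hs, h, _⟩ => ⟨s, hs, h⟩, fun ⟨s, hs, h⟩ => ⟨s, hs, h, hF s hs, hT s hs⟩⟩

theorem cv_mem_partly (L : List String) (hF : ¬ L.any (fun s => PySem.Str.isIn "FALSE" s) = true)
    (hT : ¬ L.any (fun s => PySem.Str.isIn "TRUE" s) = true)
    (hM : ¬ L.any (fun s => PySem.Str.isIn "MISLEADING" s) = true) :
    "PARTLY TRUE" ∈ L.filterMap cvLabOf ↔ L.any (fun s => PySem.Str.isIn "PARTLY" s) = true := by
  simp only [List.any_eq_true, not_exists, not_and] at hF hT hM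
  simp only [List.mem_filterMap, List.any_eq_true, cvLabOf_partly_iff]
  exact ⟨fun ⟨s, hs, h, _⟩ => ⟨s, hs, h⟩, fun ⟨s, hs, h⟩ => ⟨s, hs, h, hF s hs, hT s hs, hM s hs⟩⟩

-- ===== VERDICT (by name: the statement is the Claim_ definition above) =====
theorem compute_verdict_from_factchecks_spec : Claim_equal_compute_verdict_from_factchecks := by
  intro factchecks _
  unfold Spec_compute_verdict_from_factchecks
  unfold compute_verdict_from_factchecks compute_verdict_from_factchecks_alt
  by_cases hfc : factchecks = []
  · subst hfc; simp [cvRatings]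
  · rw [if_neg hfc, cvA_outer]
    simp only [List.nil_append]
    set L := cvRatings factchecks with hL
    by_cases hF : (L.any fun s => PySem.Str.isIn "FALSE" s) = true
    · rw [if_pos ((cv_mem_false L).mpr hF), if_pos hF]
    · have nf : "FALSE" ∉ L.filterMap cvLabOf := fun h => hF ((cv_mem_false L).mp h)
      by_cases hT : (L.any fun s => PySem.Str.isIn "TRUE" s) = true
      · rw [if_neg nf, if_pos ((cv_mem_true L hF).mpr hT), if_neg hF, if_pos hT]
      · have nt : "TRUE" ∉ L.filterMap cvLabOf := fun h => hT ((cv_mem_true L hF).mp h)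
        by_cases hM : (L.any fun s => PySem.Str.isIn "MISLEADING" s) = true
        · rw [if_neg nf, if_neg nt, if_pos ((cv_mem_mis L hF hT).mpr hM), if_neg hF, if_neg hT, if_pos hM]
        · have nm : "MISLEADING" ∉ L.filterMap cvLabOf := fun h => hM ((cv_mem_mis L hF hT).mp h)
          by_cases hP : (L.any fun s => PySem.Str.isIn "PARTLY" s) = true
          · rw [if_neg nf, if_neg nt, if_neg nm, if_pos ((cv_mem_partly L hF hT hM).mpr hP),
              if_neg hF, if_neg hT, if_neg hM, if_pos hP]
          · have np : "PARTLY TRUE" ∉ L.filterMap cvLabOf := fun h => hP ((cv_mem_partly L hF hT hM).mp h)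
            rw [if_neg nf, if_neg nt, if_neg nm, if_neg np,
              if_neg hF, if_neg hT, if_neg hM, if_neg hP]
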